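-- pv_equiv track=rewrite | github.com/sylvzzz/42_Piscine_Python | PyM3/ex3/ft_achievement_tracker.py | get_rare_achievements
-- ===== SOURCE A (Python) =====
-- def get_all_achievements(players: dict) -> set:
--     all_achievements = set()
--     for achievements in players.values():
--         all_achievements = all_achievements.union(achievements)
--     return all_achievements
--
-- def get_rare_achievements(players: dict, rarity_threshold: int = 1) -> set:
--     all_achievements = get_all_achievements(players)
--     rare = set()
--     for achievement in all_achievements:
--         count = sum(
--             1 for achievements in players.values()
--             if achievement in achievements
--         )
--         if count <= rarity_threshold:
--             rare.add(achievement)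
--
--     return rare
-- ===== SOURCE B (Python) =====
-- def get_rare_achievements(players: dict, rarity_threshold: int = 1) -> set:
--     counts = {}
--     for achievements in players.values():
--         for achievement in set(achievements):
--             counts[achievement] = counts.get(achievement, 0) + 1
--     rare = set()
--     for achievement, count in counts.items():
--         if count <= rarity_threshold:
--             rare.add(achievement)
--     return rare
-- ===== Notes on version B (the rewrite author's own statement) =====
-- stated objective: faster
-- what changed: Replaces A's union-of-all-achievements followed by a full rescan of every player per achievement with a single pass that builds a dict counting distinct players per achievement, then one filter pass over the dict items.
import Mathlib
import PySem

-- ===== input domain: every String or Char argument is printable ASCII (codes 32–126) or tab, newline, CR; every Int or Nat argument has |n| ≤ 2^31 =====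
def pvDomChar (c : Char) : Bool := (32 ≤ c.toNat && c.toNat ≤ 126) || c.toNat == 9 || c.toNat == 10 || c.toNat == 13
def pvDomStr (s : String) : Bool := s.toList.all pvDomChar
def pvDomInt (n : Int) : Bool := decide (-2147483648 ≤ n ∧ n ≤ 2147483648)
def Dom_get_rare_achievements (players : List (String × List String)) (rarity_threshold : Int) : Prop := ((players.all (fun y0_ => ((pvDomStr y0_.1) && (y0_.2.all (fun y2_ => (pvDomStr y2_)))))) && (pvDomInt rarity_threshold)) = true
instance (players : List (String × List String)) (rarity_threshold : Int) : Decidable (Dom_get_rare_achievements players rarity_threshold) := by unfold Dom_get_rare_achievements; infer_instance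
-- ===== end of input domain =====

-- B replaces A's union-then-rescan (for each achievement, re-scan all players) by one
-- index-building pass that counts distinct players per achievement, then one filter pass
-- over the counts (objective: faster, O(P·A) vs O(P·A·U)). Both return a set; the ports
-- realise both sets in Python's insertion order, which here coincides.

-- ===== PORT A =====
def get_all_achievements (players : List (String × List String)) : List String :=
  players.foldl (fun all_achievements p => PySem.Set.union all_achievements p.2) PySem.Set.empty

def get_rare_achievements (players : List (String × List String)) (rarity_threshold : Int) : List String :=
  let all_achievements := get_all_achievements players
  all_achievements.foldl (fun rare achievement =>
    let count : Int := players.foldl (fun c p => if p.2.contains achievement then c + 1 else c) 0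
    if count ≤ rarity_threshold then PySem.Set.add rare achievement else rare) PySem.Set.empty

-- ===== PORT B =====
def get_rare_achievements_alt (players : List (String × List String)) (rarity_threshold : Int) : List String :=
  let counts : PySem.Dict String Int :=
    players.foldl (fun counts p =>
      (PySem.Set.ofList p.2).foldl (fun counts achievement =>
        counts.insert achievement (counts.getD achievement 0 + 1)) counts) (PySem.Dict.mk [])
  counts.items.foldl (fun rare kv =>
    if kv.2 ≤ rarity_threshold then PySem.Set.add rare kv.1 else rare) PySem.Set.empty

-- ===== PRECONDITION & SPEC =====
def Spec_get_rare_achievements (players : List (String × List String)) (rarity_threshold : Int) (out : List String) : Prop := out = get_rare_achievements_alt players rarity_threshold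
instance (players : List (String × List String)) (rarity_threshold : Int) (out : List String) : Decidable (Spec_get_rare_achievements players rarity_threshold out) := by unfold Spec_get_rare_achievements; infer_instance

-- ===== CLAIM (what is proved, stated in full; the proofs are below) =====
def Claim_equal_get_rare_achievements : Prop := ∀ (players : List (String × List String)) (rarity_threshold : Int), Dom_get_rare_achievements players rarity_threshold → Spec_get_rare_achievements players rarity_threshold (get_rare_achievements players rarity_threshold)

-- ===== LEMMAS AND PROOFS =====

/-- A's inner generator-sum: the number of players whose list contains `a`. -/
def pvCnt (players : List (String × List String)) (a : String) : Int :=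
  players.foldl (fun c p => if p.2.contains a then c + 1 else c) 0

/-- B's counts dict, named for the proofs (definitionally the dict B builds). -/
def pvDict (players : List (String × List String)) : PySem.Dict String Int :=
  players.foldl (fun counts p =>
    (PySem.Set.ofList p.2).foldl (fun counts achievement =>
      counts.insert achievement (counts.getD achievement 0 + 1)) counts) (PySem.Dict.mk [])

theorem pv_upd_add (s t : List String) (x : String) :
    PySem.Set.update s (PySem.Set.add t x) = PySem.Set.add (PySem.Set.update s t) x := by
  by_cases hx : x ∈ t
  · have h1 : PySem.Set.add t x = t := by
      simp [PySem.Set.add, PySem.Set.contains, hx]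
    have h2 : x ∈ PySem.Set.update s t := (PySem.Set.mem_update s t x).2 (Or.inr hx)
    rw [h1]
    simp [PySem.Set.add, PySem.Set.contains, h2]
  · have h1 : PySem.Set.add t x = t ++ [x] := by
      simp [PySem.Set.add, PySem.Set.contains, hx]
    simp [h1, PySem.Set.update, List.foldl_append]

theorem pv_update_foldl (xs : List String) (s t : List String) :
    PySem.Set.update s (xs.foldl PySem.Set.add t) = PySem.Set.update (PySem.Set.update s t) xs := by
  induction xs generalizing s t with
  | nil => rfl
  | cons x xs ih =>
      show PySem.Set.update s (xs.foldl PySem.Set.add (PySem.Set.add t x)) = _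
      rw [ih, pv_upd_add]
      rfl

theorem pv_update_ofList (s xs : List String) :
    PySem.Set.update s (PySem.Set.ofList xs) = PySem.Set.update s xs := by
  rw [PySem.Set.ofList, pv_update_foldl]
  rfl

theorem pv_getD_map (S : List String) (g : String → Int) (y : String) (hy : y ∉ S) :
    (PySem.Dict.mk (S.map (fun a => (a, g a)))).getD y 0 = 0 := by
  induction S with
  | nil => rfl
  | cons s S ih =>
      have hne : ¬ (s == y) = true := by
        simp only [beq_iff_eq]; rintro rfl; exact hy (List.mem_cons_self ..)
      simp only [List.mem_cons, not_or] at hy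
      simpa [PySem.Dict.getD, PySem.Dict.get?, List.find?, hne] using ih hy.2

theorem pv_getD_map_mem (S : List String) (g : String → Int) (y : String)
    (hS : S.Nodup) (hy : y ∈ S) :
    (PySem.Dict.mk (S.map (fun a => (a, g a)))).getD y 0 = g y := by
  induction S with
  | nil => cases hy
  | cons s S ih =>
      rcases List.mem_cons.1 hy with rfl | hy'
      · simp only [PySem.Dict.getD, PySem.Dict.get?, List.map_cons]
        rw [List.find?_cons_of_pos (by simp)]
        rfl
      · have hne : ¬ (s == y) = true := by
          simp only [beq_iff_eq]; rintro rfl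
          exact (List.nodup_cons.1 hS).1 hy'
        have := ih (List.nodup_cons.1 hS).2 hy'
        simp only [PySem.Dict.getD, PySem.Dict.get?, List.map_cons] at this ⊢
        rw [List.find?_cons_of_neg (by simpa using hne)]
        exact this

theorem pv_contains_map (S : List String) (g : String → Int) (y : String) :
    (PySem.Dict.mk (S.map (fun a => (a, g a)))).contains y = true ↔ y ∈ S := by
  simp only [PySem.Dict.contains, List.any_eq_true, List.mem_map]
  constructor
  · rintro ⟨p, ⟨a, ha, rfl⟩, hp⟩
    simpa using (beq_iff_eq.1 hp) ▸ ha
  · intro h; exact ⟨(y, g y), ⟨y, h, rfl⟩, by simp⟩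

/-- Effect of B's inner loop (over a deduplicated list `ys`) on a dict in normal form. -/
theorem pv_inner (ys : List String) (S : List String) (g : String → Int)
    (hS : S.Nodup) (hys : ys.Nodup) (hg : ∀ a, a ∉ S → g a = 0) :
    (ys.foldl (fun d a => d.insert a (d.getD a 0 + 1)) (PySem.Dict.mk (S.map (fun a => (a, g a))))).items
      = (PySem.Set.update S ys).map (fun a => (a, g a + if a ∈ ys then 1 else 0)) := by
  induction ys generalizing S g with
  | nil =>
      simp [PySem.Set.update]
  | cons y ys ih =>
      obtain ⟨hyys, hys'⟩ := List.nodup_cons.1 hys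
      by_cases hyS : y ∈ S
      · -- overwrite in place: keys unchanged
        have hc : (PySem.Dict.mk (S.map (fun a => (a, g a)))).contains y = true :=
          (pv_contains_map S g y).2 hyS
        have hins : (PySem.Dict.mk (S.map (fun a => (a, g a)))).insert y
              ((PySem.Dict.mk (S.map (fun a => (a, g a)))).getD y 0 + 1)
            = PySem.Dict.mk (S.map (fun a => (a, if a = y then g y + 1 else g a))) := by
          rw [pv_getD_map_mem S g y hS hyS]
          simp only [PySem.Dict.insert, hc, if_pos, List.map_map]
          congr 1
          apply List.map_congr_left
          intro a _
          by_cases hay : a = y <;> simp [hay]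
        have hSadd : PySem.Set.add S y = S := by
          simp [PySem.Set.add, PySem.Set.contains, hyS]
        have := ih S (fun a => if a = y then g y + 1 else g a) hS hys'
          (fun a ha => by
            have : a ≠ y := fun h => ha (h ▸ hyS)
            simp [this, hg a ha])
        simp only [List.foldl_cons]
        rw [hins, this]
        show _ = (PySem.Set.update (PySem.Set.add S y) ys).map _
        rw [hSadd]
        apply List.map_congr_left
        intro a _
        by_cases hay : a = y
        · subst hay; simp [hyys]
        · simp [hay]
      · -- new key appended
        have hc : (PySem.Dict.mk (S.map (fun a => (a, g a)))).contains y = false :=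
          Bool.eq_false_iff.2 (fun h => hyS ((pv_contains_map S g y).1 h))
        have hgy : g y = 0 := hg y hyS
        have hins : (PySem.Dict.mk (S.map (fun a => (a, g a)))).insert y
              ((PySem.Dict.mk (S.map (fun a => (a, g a)))).getD y 0 + 1)
            = PySem.Dict.mk ((S ++ [y]).map (fun a => (a, if a = y then g y + 1 else g a))) := by
          rw [pv_getD_map S g y hyS]
          have hmapS : S.map (fun a => (a, if a = y then g y + 1 else g a))
              = S.map (fun a => (a, g a)) :=
            List.map_congr_left (fun a ha => by
              have : a ≠ y := fun h => hyS (h ▸ ha)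
              simp [this])
          simp only [PySem.Dict.insert, hc, Bool.false_eq_true, if_false, List.map_append,
            List.map_cons, List.map_nil, hmapS]
          simp [hgy]
        have hSnd : (S ++ [y]).Nodup := by
          refine List.Nodup.append hS (List.nodup_singleton y) (fun a ha hb => ?_)
          simp only [List.mem_singleton] at hb
          exact hyS (hb ▸ ha)
        have hSadd : PySem.Set.add S y = S ++ [y] := by
          simp [PySem.Set.add, PySem.Set.contains, hyS]
        have := ih (S ++ [y]) (fun a => if a = y then g y + 1 else g a) hSnd hys'
          (fun a ha => by
            simp only [List.mem_append, List.mem_singleton, not_or] at ha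
            simp [ha.2, hg a ha.1])
        simp only [List.foldl_cons]
        rw [hins, this]
        show _ = (PySem.Set.update (PySem.Set.add S y) ys).map _
        rw [hSadd]
        apply List.map_congr_left
        intro a _
        by_cases hay : a = y
        · subst hay; simp [hyys, hgy]
        · simp [hay]

theorem pvCnt_append (ps : List (String × List String)) (p : String × List String) (a : String) :
    pvCnt (ps ++ [p]) a = if p.2.contains a then pvCnt ps a + 1 else pvCnt ps a := by
  simp [pvCnt, List.foldl_append]

/-- Main invariant: B's dict lists exactly A's achievement set in the same order,
    each paired with A's player count. -/
theorem pv_main (players : List (String × List String)) :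
    (get_all_achievements players).Nodup
    ∧ (∀ a, a ∉ get_all_achievements players → pvCnt players a = 0)
    ∧ (pvDict players).items
        = (get_all_achievements players).map (fun a => (a, pvCnt players a)) := by
  induction players using List.reverseRecOn with
  | nil => exact ⟨List.nodup_nil, fun a _ => rfl, rfl⟩
  | append_singleton ps p ih =>
      obtain ⟨hnd, hzero, hitems⟩ := ih
      have hall : get_all_achievements (ps ++ [p])
          = PySem.Set.update (get_all_achievements ps) p.2 := by
        simp [get_all_achievements, List.foldl_append, PySem.Set.union]
      refine ⟨?_, ?_, ?_⟩
      · rw [hall]; exact PySem.Set.nodup_update _ _ hnd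
      · intro a ha
        rw [hall] at ha
        rw [PySem.Set.mem_update, not_or] at ha
        have hcontains : p.2.contains a = false := by
          exact Bool.not_eq_true _ ▸ (fun h => ha.2 (List.contains_iff_mem.1 h))
        rw [pvCnt_append, hcontains]
        simp [hzero a ha.1]
      · have hstep : pvDict (ps ++ [p])
            = (PySem.Set.ofList p.2).foldl (fun d a => d.insert a (d.getD a 0 + 1)) (pvDict ps) := by
          simp [pvDict, List.foldl_append]
        have hmk : pvDict ps = PySem.Dict.mk ((get_all_achievements ps).map (fun a => (a, pvCnt ps a))) := by
          cases hd : pvDict ps with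
          | mk items => simp only [hd] at hitems; rw [hitems]
        rw [hstep, hmk,
          pv_inner (PySem.Set.ofList p.2) (get_all_achievements ps) (pvCnt ps) hnd
            (PySem.Set.nodup_ofList p.2) hzero,
          pv_update_ofList, ← hall]
        apply List.map_congr_left
        intro a _
        rw [pvCnt_append]
        by_cases hm : a ∈ p.2
        · simp [PySem.Set.mem_ofList, hm]
        · simp [PySem.Set.mem_ofList, hm]

-- ===== VERDICT (by name: the statement is the Claim_ definition above) =====
theorem get_rare_achievements_spec : Claim_equal_get_rare_achievements := by
  intro players rarity_threshold _
  show get_rare_achievements players rarity_threshold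
      = get_rare_achievements_alt players rarity_threshold
  obtain ⟨-, -, hitems⟩ := pv_main players
  unfold get_rare_achievements get_rare_achievements_alt
  show _ = (pvDict players).items.foldl _ _
  rw [hitems, List.foldl_map]
  rfl
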